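-- pv_equiv track=rewrite | github.com/khudeeva/python-tests | utils/dict_utils.py | find_users_with_unique_roles
-- ===== SOURCE A (Python) =====
-- def find_users_with_unique_roles(users):
--     seen_once = set()
--     duplicates = set()
--     for key, data in users.items():
--         role = data["role"]
--         if role in seen_once:
--             duplicates.add(role)
--         else:
--             seen_once.add(role)
--
--     unique_roles = seen_once - duplicates
--     result =[]
--     for key, data in users.items():
--         if data["role"] in unique_roles:
--             result.append(key)
--     return sorted(result)
-- ===== SOURCE B (Python) =====
-- def find_users_with_unique_roles(users):
--     pairs = [(data["role"], key) for key, data in users.items()]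
--     by_role = {}
--     for role, key in pairs:
--         by_role.setdefault(role, []).append(key)
--     result = [keys[0] for keys in by_role.values() if len(keys) == 1]
--     return sorted(result)
-- ===== Notes on version B (the rewrite author's own statement) =====
-- stated objective: alternative
-- what changed: Replaces A's seen/duplicates sets with set-difference and a second membership pass over users by a single role-to-keys grouping dict whose singleton groups directly yield the result.
-- outside the precondition, e.g. on find_users_with_unique_roles({'u': {}}): A raises KeyError, B raises KeyError
import Mathlib
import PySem

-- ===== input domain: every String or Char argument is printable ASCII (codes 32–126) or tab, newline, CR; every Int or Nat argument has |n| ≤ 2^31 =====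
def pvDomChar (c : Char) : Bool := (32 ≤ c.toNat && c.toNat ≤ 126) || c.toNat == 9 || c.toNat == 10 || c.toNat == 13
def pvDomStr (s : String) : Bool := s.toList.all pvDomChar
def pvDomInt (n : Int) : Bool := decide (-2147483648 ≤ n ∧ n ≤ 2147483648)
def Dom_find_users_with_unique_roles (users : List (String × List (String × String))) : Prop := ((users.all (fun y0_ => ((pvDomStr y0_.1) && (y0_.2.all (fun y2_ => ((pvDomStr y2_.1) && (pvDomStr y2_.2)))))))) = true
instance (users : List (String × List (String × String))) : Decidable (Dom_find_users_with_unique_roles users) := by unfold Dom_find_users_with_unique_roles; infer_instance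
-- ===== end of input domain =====

-- B replaces A's seen/duplicates sets + set difference + second membership pass over users by
-- one role→keys grouping dict whose singleton groups yield the result (return value proved
-- equal on Pre_: dicts faithfully represented, every user has a "role" key).

-- ===== PORT A =====
-- data["role"] is ported as getD "role" ""; the KeyError case (no "role" key) is outside Pre_.
def find_users_with_unique_roles (users : List (String × List (String × String))) : List String :=
  let sd := users.foldl
    (fun (sd : PySem.Set String × PySem.Set String) kd =>
      let role := (PySem.Dict.mk kd.2).getD "role" ""
      if PySem.Set.contains sd.1 role then (sd.1, PySem.Set.add sd.2 role)
      else (PySem.Set.add sd.1 role, sd.2))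
    (PySem.Set.empty, PySem.Set.empty)
  let unique_roles := PySem.Set.diff sd.1 sd.2
  let result := users.foldl
    (fun acc kd =>
      if PySem.Set.contains unique_roles ((PySem.Dict.mk kd.2).getD "role" "") then acc ++ [kd.1]
      else acc) []
  PySem.List.sorted result (fun x => x) false

-- ===== PORT B =====
-- keys[0] on a length-1 list is ported as (pyGet? ks 0).getD "" (the default is never taken).
def find_users_with_unique_roles_alt (users : List (String × List (String × String))) : List String :=
  let pairs := users.map (fun kd => ((PySem.Dict.mk kd.2).getD "role" "", kd.1))
  let by_role := pairs.foldl
    (fun (d : PySem.Dict String (List String)) q => d.modify q.1 [] (fun l => l ++ [q.2]))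
    PySem.Dict.empty
  let result := (by_role.values.filter (fun ks => ks.length == 1)).map
    (fun ks => (PySem.List.pyGet? ks 0).getD "")
  PySem.List.sorted result (fun x => x) false

-- ===== PRECONDITION & SPEC =====
-- Pre_ excludes (i) inputs where some user dict lacks a "role" key — Python A raises KeyError
-- there — and (ii) association lists with duplicate keys (outer or inner), which a Python dict
-- collapses and so do not faithfully represent the dict the Python programs receive.
def Pre_find_users_with_unique_roles (users : List (String × List (String × String))) : Prop :=
  (users.map (·.1)).Nodup ∧
  ∀ p ∈ users, (p.2.map (·.1)).Nodup ∧ (PySem.Dict.mk p.2).contains "role" = true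
instance (users : List (String × List (String × String))) : Decidable (Pre_find_users_with_unique_roles users) := by unfold Pre_find_users_with_unique_roles; infer_instance

def pvWitness_find_users_with_unique_roles : (List (String × List (String × String))) :=
  [("alice", [("role", "admin")]), ("bob", [("role", "admin")]), ("carol", [("role", "dev")])]

def Spec_find_users_with_unique_roles (users : List (String × List (String × String))) (out : List String) : Prop := out = find_users_with_unique_roles_alt users
instance (users : List (String × List (String × String))) (out : List String) : Decidable (Spec_find_users_with_unique_roles users out) := by unfold Spec_find_users_with_unique_roles; infer_instance

-- ===== CLAIM (what is proved, stated in full; the proofs are below) =====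
def Claim_equal_find_users_with_unique_roles : Prop := ∀ (users : List (String × List (String × String))), Dom_find_users_with_unique_roles users → Pre_find_users_with_unique_roles users → Spec_find_users_with_unique_roles users (find_users_with_unique_roles users)

-- ===== LEMMAS AND PROOFS =====

-- the role of one user entry
def pvRole (kd : String × List (String × String)) : String := (PySem.Dict.mk kd.2).getD "role" ""

-- A's first loop, folded over the plain list of roles: membership of the two sets
theorem foldA_mem (l : List String) (s d : PySem.Set String) (x : String) :
    (x ∈ (l.foldl (fun sd r =>
        if PySem.Set.contains sd.1 r then (sd.1, PySem.Set.add sd.2 r)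
        else (PySem.Set.add sd.1 r, sd.2)) (s, d)).1 ↔ x ∈ s ∨ x ∈ l) ∧
    (x ∈ (l.foldl (fun sd r =>
        if PySem.Set.contains sd.1 r then (sd.1, PySem.Set.add sd.2 r)
        else (PySem.Set.add sd.1 r, sd.2)) (s, d)).2 ↔
      x ∈ d ∨ (x ∈ s ∧ x ∈ l) ∨ 2 ≤ l.count x) := by
  induction l generalizing s d with
  | nil => simp
  | cons r t ih =>
    simp only [List.foldl_cons]
    by_cases hc : PySem.Set.contains s r = true
    · rw [if_pos hc]
      have hrs : r ∈ s := (PySem.Set.contains_iff s r).mp hc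
      obtain ⟨ih1, ih2⟩ := ih s (PySem.Set.add d r)
      constructor
      · rw [ih1]
        by_cases hx : x = r <;> simp [hx, hrs]
      · rw [ih2, PySem.Set.mem_add]
        by_cases hx : x = r
        · subst hx
          simp [hrs, List.count_cons_self]
        · simp [hx, Ne.symm hx]
    · rw [if_neg hc]
      have hrs : r ∉ s := fun h => hc ((PySem.Set.contains_iff s r).mpr h)
      obtain ⟨ih1, ih2⟩ := ih (PySem.Set.add s r) d
      constructor
      · rw [ih1, PySem.Set.mem_add]
        by_cases hx : x = r
        · subst hx; simp
        · simp only [List.mem_cons, hx, false_or]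
          tauto
      · rw [ih2, PySem.Set.mem_add]
        by_cases hx : x = r
        · subst hx
          have hcnt : 2 ≤ List.count x t → x ∈ t := fun h => List.count_pos_iff.mp (by omega)
          simp [hrs]
          constructor
          · rintro (h|h|h); exacts [Or.inl h, Or.inr h, Or.inr (hcnt h)]
          · rintro (h|h); exacts [Or.inl h, Or.inr (Or.inl h)]
        · simp [hx, Ne.symm hx]

theorem flatMap_congr_mem {α β : Type} (l : List α) (f g : α → List β)
    (h : ∀ x ∈ l, f x = g x) : l.flatMap f = l.flatMap g := by
  induction l with
  | nil => rfl
  | cons a t ih =>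
    simp only [List.flatMap_cons, h a (by simp), ih (fun x hx => h x (by simp [hx]))]

theorem map_eq_flatMap_of_singleton {α β : Type} (S : List α) (g : α → List β) (e : α → β)
    (h : ∀ x ∈ S, g x = [e x]) : S.flatMap g = S.map e := by
  induction S with
  | nil => rfl
  | cons a t ih =>
    simp only [List.flatMap_cons, List.map_cons, h a (by simp),
      ih (fun x hx => h x (by simp [hx]))]
    rfl

-- grouping permutation: concatenating the fibres over a covering nodup key list permutes l
theorem group_perm (rs : List String) (hnd : rs.Nodup) (l : List (String × String))
    (hcov : ∀ q ∈ l, q.1 ∈ rs) :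
    (rs.flatMap (fun r => l.filter (fun q => q.1 == r))).Perm l := by
  induction rs generalizing l with
  | nil =>
    cases l with
    | nil => simp
    | cons a t => exact absurd (hcov a (by simp)) (by simp)
  | cons r rs ih =>
    obtain ⟨hr, hnd'⟩ := List.nodup_cons.mp hnd
    simp only [List.flatMap_cons]
    have hrest : rs.flatMap (fun r' => l.filter (fun q => q.1 == r')) =
        rs.flatMap (fun r' => (l.filter (fun q => !(q.1 == r))).filter (fun q => q.1 == r')) := by
      apply flatMap_congr_mem
      intro r' hr'
      rw [List.filter_filter]
      apply List.filter_congr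
      intro q _
      by_cases hq : q.1 = r'
      · have hne : r' ≠ r := fun e => hr (e ▸ hr')
        simp [hq, hne]
      · simp [hq]
    rw [hrest]
    have hcov' : ∀ q ∈ l.filter (fun q => !(q.1 == r)), q.1 ∈ rs := by
      intro q hq
      have hm := List.mem_of_mem_filter hq
      have hne : ¬ q.1 = r := by simpa using List.of_mem_filter hq
      have := hcov q hm
      simp only [List.mem_cons] at this
      tauto
    have hperm := ih hnd' _ hcov'
    exact (List.Perm.append_left _ hperm).trans (List.filter_append_perm _ l)

-- the two pre-sort lists are permutations of each other, hence the sorted outputs are equal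

def pvGrp (pairs : List (String × String)) (r : String) : List String :=
  (pairs.filter (fun q => q.1 == r)).map (fun q => q.2)

theorem main_eq (users : List (String × List (String × String))) :
    find_users_with_unique_roles users = find_users_with_unique_roles_alt users := by
  set roles := users.map pvRole with hr
  set pairs := users.map (fun kd => (pvRole kd, kd.1)) with hp
  have hmapfst : pairs.map (fun q => q.1) = roles := by
    rw [hp, hr, List.map_map]; rfl
  -- ===== A side =====
  have hA : find_users_with_unique_roles users =
      PySem.List.sorted ((users.filter (fun kd => roles.count (pvRole kd) == 1)).map
        Prod.fst) (fun x => x) false := by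
    simp only [find_users_with_unique_roles]
    rw [PySem.List.foldl_append_if]
    simp only [List.nil_append]
    have hfold : users.foldl
        (fun (sd : PySem.Set String × PySem.Set String) kd =>
          if PySem.Set.contains sd.1 ((PySem.Dict.mk kd.2).getD "role" "") then
            (sd.1, PySem.Set.add sd.2 ((PySem.Dict.mk kd.2).getD "role" ""))
          else (PySem.Set.add sd.1 ((PySem.Dict.mk kd.2).getD "role" ""), sd.2))
        (PySem.Set.empty, PySem.Set.empty)
      = roles.foldl
        (fun (sd : PySem.Set String × PySem.Set String) r =>
          if PySem.Set.contains sd.1 r then (sd.1, PySem.Set.add sd.2 r)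
          else (PySem.Set.add sd.1 r, sd.2))
        (PySem.Set.empty, PySem.Set.empty) :=
      (List.foldl_map (f := fun (kd : String × List (String × String)) =>
          (PySem.Dict.mk kd.2).getD "role" "")
        (g := fun (sd : PySem.Set String × PySem.Set String) r =>
          if PySem.Set.contains sd.1 r then (sd.1, PySem.Set.add sd.2 r)
          else (PySem.Set.add sd.1 r, sd.2))
        (l := users) (init := (PySem.Set.empty, PySem.Set.empty))).symm
    rw [hfold]
    have hfc : ∀ kd ∈ users,
        PySem.Set.contains (PySem.Set.diff
          (roles.foldl (fun (sd : PySem.Set String × PySem.Set String) r =>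
            if PySem.Set.contains sd.1 r then (sd.1, PySem.Set.add sd.2 r)
            else (PySem.Set.add sd.1 r, sd.2)) (PySem.Set.empty, PySem.Set.empty)).1
          (roles.foldl (fun (sd : PySem.Set String × PySem.Set String) r =>
            if PySem.Set.contains sd.1 r then (sd.1, PySem.Set.add sd.2 r)
            else (PySem.Set.add sd.1 r, sd.2)) (PySem.Set.empty, PySem.Set.empty)).2)
          ((PySem.Dict.mk kd.2).getD "role" "")
        = (roles.count (pvRole kd) == 1) := by
      intro kd hkd
      show PySem.Set.contains _ (pvRole kd) = (roles.count (pvRole kd) == 1)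
      have hmem : pvRole kd ∈ roles := List.mem_map_of_mem hkd
      have h1 : 0 < roles.count (pvRole kd) := List.count_pos_iff.mpr hmem
      obtain ⟨hseen, hdup⟩ := foldA_mem roles PySem.Set.empty PySem.Set.empty (pvRole kd)
      by_cases h : roles.count (pvRole kd) = 1
      · have hin : pvRole kd ∈ PySem.Set.diff _ _ := (PySem.Set.mem_diff _ _ _).mpr
          ⟨hseen.mpr (Or.inr hmem),
           fun hx => by
             have := hdup.mp hx
             simp only [PySem.Set.empty, List.not_mem_nil, false_or, false_and] at this
             omega⟩
        rw [(PySem.Set.contains_iff _ _).mpr hin]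
        simp [h]
      · have hbeq : (roles.count (pvRole kd) == 1) = false := by simpa using h
        rw [hbeq, ← Bool.not_eq_true]
        intro hc
        obtain ⟨hx1, hx2⟩ := (PySem.Set.mem_diff _ _ _).mp ((PySem.Set.contains_iff _ _).mp hc)
        exact hx2 (hdup.mpr (Or.inr (Or.inr (by omega))))
    rw [List.filter_congr hfc]
  -- ===== B side =====
  have hlen : ∀ r, (pvGrp pairs r).length = roles.count r := by
    intro r
    rw [pvGrp, List.length_map, ← hmapfst, List.count_eq_countP, List.countP_map,
      List.countP_eq_length_filter]
    rfl
  have hgetD : ∀ r, (pairs.foldl (fun (d : PySem.Dict String (List String)) q =>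
      d.modify q.1 [] (fun l => l ++ [q.2])) PySem.Dict.empty).getD r [] = pvGrp pairs r := by
    intro r
    have := PySem.Dict.getD_foldl_modify_append pairs PySem.Dict.empty r
    rw [PySem.Dict.getD_empty, List.nil_append] at this
    exact this
  have hkeys : (pairs.foldl (fun (d : PySem.Dict String (List String)) q =>
      d.modify q.1 [] (fun l => l ++ [q.2])) PySem.Dict.empty).keys
      = PySem.Set.ofList roles := by
    have := PySem.Dict.keys_foldl_modify_key pairs (fun q => q.1) ([] : List String)
      (fun _ q => fun l => l ++ [q.2]) PySem.Dict.empty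
    rw [PySem.Dict.keys_empty, PySem.Set.update_nil_left, hmapfst] at this
    exact this
  have hnd : (pairs.foldl (fun (d : PySem.Dict String (List String)) q =>
      d.modify q.1 [] (fun l => l ++ [q.2])) PySem.Dict.empty).keys.Nodup := by
    rw [hkeys]; exact PySem.Set.nodup_ofList roles
  have hB : find_users_with_unique_roles_alt users =
      PySem.List.sorted ((((PySem.Set.ofList roles).filter (fun r => roles.count r == 1)).map
        (fun r => (PySem.List.pyGet? (pvGrp pairs r) 0).getD "")) : List String)
        (fun x => x) false := by
    simp only [find_users_with_unique_roles_alt]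
    rw [show users.map (fun kd => ((PySem.Dict.mk kd.2).getD "role" "", kd.1)) = pairs from rfl]
    rw [PySem.Dict.values_eq_map_keys _ hnd ([] : List String), hkeys,
      List.map_congr_left (fun k _ => hgetD k), List.filter_map, List.map_map]
    rw [List.filter_congr (fun r (_ : r ∈ PySem.Set.ofList roles) => by
      show ((pvGrp pairs r).length == 1) = (roles.count r == 1)
      rw [hlen r])]
    rfl
  rw [hA, hB]
  apply PySem.List.sorted_eq_sorted_of_perm _ _ _ (fun a b h => h)
  -- the two pre-sort lists are permutations
  have hS_nodup : ((PySem.Set.ofList roles).filter (fun r => roles.count r == 1)).Nodup :=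
    (PySem.Set.nodup_ofList roles).filter _
  have hsing : ∀ r ∈ (PySem.Set.ofList roles).filter (fun r => roles.count r == 1),
      pvGrp pairs r = [(PySem.List.pyGet? (pvGrp pairs r) 0).getD ""] := by
    intro r hrS
    have hc1 : roles.count r = 1 := by simpa using List.of_mem_filter hrS
    have hl1 : (pvGrp pairs r).length = 1 := by rw [hlen r, hc1]
    obtain ⟨a, ha⟩ := List.length_eq_one_iff.mp hl1
    rw [ha]
    rfl
  rw [← map_eq_flatMap_of_singleton _ _ _ hsing]
  have h2 : ((PySem.Set.ofList roles).filter (fun r => roles.count r == 1)).flatMap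
        (pvGrp pairs)
      = (((PySem.Set.ofList roles).filter (fun r => roles.count r == 1)).flatMap
        (fun r => pairs.filter (fun q => q.1 == r))).map (fun q => q.2) := by
    rw [List.map_flatMap]
    rfl
  have h3 : ((PySem.Set.ofList roles).filter (fun r => roles.count r == 1)).flatMap
        (fun r => pairs.filter (fun q => q.1 == r))
      = ((PySem.Set.ofList roles).filter (fun r => roles.count r == 1)).flatMap
        (fun r => (pairs.filter (fun q => roles.count q.1 == 1)).filter
          (fun q => q.1 == r)) := by
    apply flatMap_congr_mem
    intro r hrS
    have hc1 : roles.count r = 1 := by simpa using List.of_mem_filter hrS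
    rw [List.filter_filter]
    apply List.filter_congr
    intro q _
    by_cases hq : q.1 = r
    · simp [hq, hc1]
    · simp [hq]
  have hcov : ∀ q ∈ pairs.filter (fun q => roles.count q.1 == 1),
      q.1 ∈ (PySem.Set.ofList roles).filter (fun r => roles.count r == 1) := by
    intro q hq
    have hm : q.1 ∈ roles := by
      rw [← hmapfst]
      exact List.mem_map_of_mem (List.mem_of_mem_filter hq)
    have hq1 : (roles.count q.1 == 1) = true := by simpa using List.of_mem_filter hq
    exact List.mem_filter.mpr ⟨(PySem.Set.mem_ofList _ _).mpr hm, hq1⟩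
  have h4 := group_perm _ hS_nodup _ hcov
  rw [← h3] at h4
  have h5 := h4.map (fun (q : String × String) => q.2)
  rw [← h2] at h5
  have hlp : (pairs.filter (fun q => roles.count q.1 == 1)).map (fun q => q.2)
      = (users.filter (fun kd => roles.count (pvRole kd) == 1)).map Prod.fst := by
    rw [hp, List.filter_map, List.map_map]
    rfl
  rw [hlp] at h5
  exact h5.symm

-- ===== VERDICT (by name: the statement is the Claim_ definition above) =====
theorem find_users_with_unique_roles_spec : Claim_equal_find_users_with_unique_roles := by
  intro users _ _
  exact main_eq users
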